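-- pv_equiv track=rewrite | github.com/kuznetsovvj/education | algorithms/codeforces/233a.py | check
-- ===== SOURCE A (Python) =====
-- def check(n):
--     if n % 2 == 1:
--         return "-1"
--     else:
--         res = []
--         i = 2
--         for _ in range(n//2):
--             res.append(i)
--             i -= 1
--             res.append(i)
--             i += 3
--
--         return ' '.join(map(str, res))
-- ===== SOURCE B (Python) =====
-- def check(n):
--     if n % 2 == 1:
--         return "-1"
--     return ' '.join(str(k + 1 if k % 2 else k - 1) for k in range(1, n + 1))
-- ===== Notes on version B (the rewrite author's own statement) =====
-- stated objective: simpler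
-- what changed: Replaces A's stateful pair-granular loop with a counter and list accumulator by a single stateless pass that emits a closed-form value per index based on its parity.
import Mathlib
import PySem

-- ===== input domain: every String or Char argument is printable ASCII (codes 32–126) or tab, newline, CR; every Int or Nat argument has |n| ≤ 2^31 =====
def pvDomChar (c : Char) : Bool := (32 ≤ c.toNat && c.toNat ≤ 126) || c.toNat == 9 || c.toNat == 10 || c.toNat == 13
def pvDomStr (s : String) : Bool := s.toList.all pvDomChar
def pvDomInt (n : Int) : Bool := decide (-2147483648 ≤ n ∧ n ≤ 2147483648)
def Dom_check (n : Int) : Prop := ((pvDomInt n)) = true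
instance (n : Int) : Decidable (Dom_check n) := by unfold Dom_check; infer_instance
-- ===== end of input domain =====

-- B replaces A's stateful pair-emitting loop (counter i, list accumulator) by a single stateless
-- per-index pass: position k gets the closed-form value k+1 (k odd) / k-1 (k even) (simpler).

-- ===== PORT A =====
def check (n : Int) : String :=
  if PySem.Int.mod n 2 == 1 then "-1"
  else
    let st := (PySem.List.pyRange 0 (PySem.Int.floordiv n 2) 1).foldl
      (fun (st : List Int × Int) _ =>
        let res := st.1 ++ [st.2]
        let i := st.2 - 1
        let res := res ++ [i]
        let i := i + 3
        (res, i)) ([], 2)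
    PySem.Str.join " " (st.1.map PySem.Int.toStr)

-- ===== PORT B =====
def check_alt (n : Int) : String :=
  if PySem.Int.mod n 2 == 1 then "-1"
  else
    PySem.Str.join " "
      ((PySem.List.pyRange 1 (n + 1) 1).map
        (fun k => PySem.Int.toStr (if PySem.Int.mod k 2 != 0 then k + 1 else k - 1)))

-- ===== PRECONDITION & SPEC =====
def Spec_check (n : Int) (out : String) : Prop := out = check_alt n
instance (n : Int) (out : String) : Decidable (Spec_check n out) := by unfold Spec_check; infer_instance

-- ===== CLAIM (what is proved, stated in full; the proofs are below) =====
def Claim_equal_check : Prop := ∀ (n : Int), Dom_check n → Spec_check n (check n)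

-- ===== LEMMAS AND PROOFS =====

-- the per-index value B emits (same expression as in check_alt's lambda)
def pvF (k : Int) : Int := if PySem.Int.mod k 2 != 0 then k + 1 else k - 1

-- A's loop body as a plain function on the state
def pvStep (st : List Int × Int) : List Int × Int :=
  let res := st.1 ++ [st.2]
  let i := st.2 - 1
  let res := res ++ [i]
  let i := i + 3
  (res, i)

lemma pvF_odd (t : Int) : pvF (2 * t + 1) = 2 * t + 2 := by
  unfold pvF
  rw [PySem.Int.mod_eq_emod_of_pos (by norm_num)]
  have h : (2 * t + 1) % 2 = 1 := by omega
  simp [h]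
  ring

lemma pvF_even (t : Int) : pvF (2 * t + 2) = 2 * t + 1 := by
  unfold pvF
  rw [PySem.Int.mod_eq_emod_of_pos (by norm_num)]
  have h : (2 * t + 2) % 2 = 0 := by omega
  simp [h]
  ring

-- loop invariant: after m iterations A's accumulator is B's list for k = 1 .. 2m, and i = 2m+2
lemma loop_inv (m : Nat) :
    (List.range m).foldl (fun st _ => pvStep st) ([], 2)
      = ((PySem.List.pyRange 1 (2 * (m : Int) + 1) 1).map pvF, 2 * (m : Int) + 2) := by
  induction m with
  | zero => simp [PySem.List.pyRange_one_eq_nil]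
  | succ m ih =>
    rw [List.range_succ, List.foldl_append, ih]
    have e2 : PySem.List.pyRange 1 (2 * (m : Int) + 1 + 1) 1
        = PySem.List.pyRange 1 (2 * (m : Int) + 1) 1 ++ [2 * (m : Int) + 1] :=
      PySem.List.pyRange_one_succ_right (by omega)
    have e1 : PySem.List.pyRange 1 (2 * (m : Int) + 1 + 1 + 1) 1
        = PySem.List.pyRange 1 (2 * (m : Int) + 1 + 1) 1 ++ [2 * (m : Int) + 1 + 1] :=
      PySem.List.pyRange_one_succ_right (by omega)
    have hcast : 2 * ((m : Nat) + 1 : Int) + 1 = 2 * (m : Int) + 1 + 1 + 1 := by ring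
    push_cast
    rw [hcast, e1, e2]
    simp only [List.foldl, pvStep, List.map_append, List.map_cons, List.map_nil,
      List.append_assoc, List.cons_append, List.nil_append]
    refine Prod.ext ?_ ?_
    · simp only [pvF_odd]
      have h2 : (2 : Int) * (m : Int) + 1 + 1 = 2 * (m : Int) + 2 := by ring
      rw [h2, pvF_even]
      simp
      omega
    · simp
      omega

-- a foldl whose step ignores the elements only depends on the range's length
lemma foldl_pyRange_const {α : Type} (f : α → α) (a b : Int) (init : α) :
    (PySem.List.pyRange a b 1).foldl (fun st _ => f st) init
      = (List.range (b - a).toNat).foldl (fun st _ => f st) init := by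
  rw [PySem.List.pyRange_one, List.foldl_map]

theorem check_spec_aux (n : Int) : check n = check_alt n := by
  unfold check check_alt
  by_cases h : PySem.Int.mod n 2 = 1
  · have h' : n % 2 = 1 := by
      rw [← PySem.Int.mod_eq_emod_of_pos (by norm_num)]; exact h
    simp [h']
  · have hmod0 : PySem.Int.mod n 2 = 0 := (PySem.Int.mod_two_eq n).resolve_right h
    have hmod : n % 2 = 0 := by
      rw [← PySem.Int.mod_eq_emod_of_pos (by norm_num)]; exact hmod0
    rw [if_neg (by simp; omega), if_neg (by simp; omega)]
    show PySem.Str.join " " (((PySem.List.pyRange 0 (PySem.Int.floordiv n 2) 1).foldl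
        (fun st _ => pvStep st) ([], 2)).1.map PySem.Int.toStr)
      = PySem.Str.join " " ((PySem.List.pyRange 1 (n + 1) 1).map (fun k => PySem.Int.toStr (pvF k)))
    rw [foldl_pyRange_const pvStep]
    by_cases hpos : 0 < n
    · obtain ⟨m, hm⟩ : ∃ m : Nat, n = 2 * (m : Int) := ⟨(n / 2).toNat, by omega⟩
      have hq : PySem.Int.floordiv n 2 = (m : Int) := by
        rw [PySem.Int.floordiv_eq_ediv_of_pos (by norm_num)]; omega
      rw [hq]
      have : ((m : Int) - 0).toNat = m := by omega
      rw [this, loop_inv, hm]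
      have h2 : 2 * (m : Int) + 1 = 2 * (m : Int) + 1 := rfl
      rw [List.map_map]
      rfl
    · have e0 : ((PySem.Int.floordiv n 2) - 0).toNat = 0 := by
        have := PySem.Int.floordiv_eq_ediv_of_pos (a := n) (b := 2) (by norm_num)
        omega
      have e2 : PySem.List.pyRange 1 (n + 1) 1 = [] :=
        PySem.List.pyRange_one_eq_nil (by omega)
      rw [e0, e2]
      simp

-- ===== VERDICT (by name: the statement is the Claim_ definition above) =====
theorem check_spec : Claim_equal_check := by
  intro n _
  unfold Spec_check
  exact check_spec_aux n
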